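-- pv_equiv track=rewrite | github.com/lwilanski/Algorithms-and-Data-Structures | dynamic_programming/ferry_loading.py | ver
-- ===== SOURCE A (Python) =====
-- def ver(A, L, left=0, right=0, c_car=0):
--     cl = (left + A[c_car] <= L)
--     cr = (right + A[c_car] <= L)
--
--     if not cl and not cr:
--         return c_car
--
--     if (cr or cl) and c_car == len(A) - 1:
--         return c_car + 1
--
--     a = float('-inf')
--     b = float('-inf')
--
--     if cl:
--         a = ver(A, L, left + A[c_car], right, c_car + 1)
--
--     if cr:
--         b = ver(A, L, left, right + A[c_car], c_car + 1)
--
--     return max(a, b)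
-- ===== SOURCE B (Python) =====
-- def ver(A, L, left=0, right=0, c_car=0):
--     # forward sweep over a deduplicated set of reachable states per car index instead of the two-branch recursion
--     n = len(A)
--     load = left + right
--     lefts = {left}
--     best = c_car
--     for i in range(c_car, n):
--         w = A[i]
--         nxt = {x + w for x in lefts if x + w <= L}
--         nxt |= {x for x in lefts if load + w - x <= L}
--         if not nxt:
--             return best
--         lefts = nxt
--         load += w
--         best = i + 1
--     return best
-- ===== Notes on version B (the rewrite author's own statement) =====
-- stated objective: alternative
-- what changed: Replaces the exponential two-branch recursion with a single forward sweep over the car index that keeps one deduplicated set of reachable left-lane loads per step (the right load is determined by the running total), returning the last index at which some state survives; the state set is usually far smaller than the recursion tree but can itself grow exponentially on mixed-sign inputs, so no uniform speed-up is claimed.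
import Mathlib
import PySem

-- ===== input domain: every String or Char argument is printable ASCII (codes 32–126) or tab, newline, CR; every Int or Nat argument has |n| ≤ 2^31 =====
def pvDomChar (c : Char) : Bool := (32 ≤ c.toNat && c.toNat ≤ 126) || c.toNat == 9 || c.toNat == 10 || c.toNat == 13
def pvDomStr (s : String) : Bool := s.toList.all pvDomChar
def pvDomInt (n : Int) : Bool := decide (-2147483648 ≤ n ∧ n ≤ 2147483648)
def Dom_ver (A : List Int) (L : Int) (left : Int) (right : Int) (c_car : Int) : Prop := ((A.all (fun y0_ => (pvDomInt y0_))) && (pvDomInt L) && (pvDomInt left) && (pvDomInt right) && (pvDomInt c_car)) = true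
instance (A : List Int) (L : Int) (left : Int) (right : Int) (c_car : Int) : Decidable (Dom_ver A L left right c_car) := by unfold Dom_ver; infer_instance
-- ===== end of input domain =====

-- B replaces A's two-branch recursion by one forward sweep over the car index keeping a
-- deduplicated set of reachable left-lane loads per step (a different algorithm; often,
-- though not always, cheaper — a timing run could not confirm a uniform speed-up).

-- ===== PORT A =====
-- max(a, b) where either operand may be Python's float('-inf') (modelled as none);
-- A never reaches the max with both operands -inf, so the none/none value is irrelevant.
def pyMaxOpt (a b : Option Int) : Int :=
  match a, b with
  | some x, some y => max x y
  | some x, none   => x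
  | none,   some y => y
  | none,   none   => 0

def ver (A : List Int) (L : Int) (left : Int) (right : Int) (c_car : Int) : Int :=
  -- the guard only makes the function total: Python raises IndexError on A[c_car]
  -- exactly when it fails (excluded by Pre_ver)
  if h : PySem.Raise.InRange A.length c_car then
    let w := (PySem.List.pyGet? A c_car).getD 0    -- A[c_car]
    if ¬ (left + w ≤ L) ∧ ¬ (right + w ≤ L) then c_car
    else if ((right + w ≤ L) ∨ (left + w ≤ L)) ∧ c_car = (A.length : Int) - 1 then c_car + 1
    else
      let a : Option Int := if left + w ≤ L then some (ver A L (left + w) right (c_car + 1)) else none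
      let b : Option Int := if right + w ≤ L then some (ver A L left (right + w) (c_car + 1)) else none
      pyMaxOpt a b
  else 0
termination_by ((A.length : Int) - c_car).toNat
decreasing_by
  all_goals exact (Int.toNat_lt_toNat (sub_pos.mpr h.2)).mpr (sub_lt_sub_left (lt_add_one c_car) _)

-- ===== PORT B =====
-- the body of Source B's for-loop with its early return, as a recursion over the car index i;
-- `best` is carried exactly as in Source B
def verAltGo (A : List Int) (L : Int) (i : Int) (load : Int) (lefts : PySem.Set Int) (best : Int) : Int :=
  if _hi : i < (A.length : Int) then
    let w := (PySem.List.pyGet? A i).getD 0    -- A[i]; in range whenever Pre_ver holds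
    let nxt1 : PySem.Set Int :=
      lefts.foldl (fun s x => if x + w ≤ L then PySem.Set.add s (x + w) else s) PySem.Set.empty
    let nxt : PySem.Set Int :=
      lefts.foldl (fun s x => if load + w - x ≤ L then PySem.Set.add s x else s) nxt1
    if nxt = [] then best
    else verAltGo A L (i + 1) (load + w) nxt (i + 1)
  else best
termination_by ((A.length : Int) - i).toNat
decreasing_by exact (Int.toNat_lt_toNat (sub_pos.mpr _hi)).mpr (sub_lt_sub_left (lt_add_one i) _)

def ver_alt (A : List Int) (L : Int) (left : Int) (right : Int) (c_car : Int) : Int :=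
  verAltGo A L c_car (left + right) (PySem.Set.ofList [left]) c_car

-- ===== PRECONDITION & SPEC =====
-- exactly the inputs where A's first access A[c_car] (and hence the whole recursion) does
-- not raise IndexError: the usual Python index range, including negative indices
def Pre_ver (A : List Int) (L : Int) (left : Int) (right : Int) (c_car : Int) : Prop :=
  PySem.Raise.InRange A.length c_car
instance (A : List Int) (L : Int) (left : Int) (right : Int) (c_car : Int) : Decidable (Pre_ver A L left right c_car) := by unfold Pre_ver; infer_instance

def pvWitness_ver : List Int × Int × Int × Int × Int := ([3, 2, 4, 1], 5, 0, 0, 0)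

def Spec_ver (A : List Int) (L : Int) (left : Int) (right : Int) (c_car : Int) (out : Int) : Prop := out = ver_alt A L left right c_car
instance (A : List Int) (L : Int) (left : Int) (right : Int) (c_car : Int) (out : Int) : Decidable (Spec_ver A L left right c_car out) := by unfold Spec_ver; infer_instance

-- ===== CLAIM (what is proved, stated in full; the proofs are below) =====
def Claim_equal_ver : Prop := ∀ (A : List Int) (L : Int) (left : Int) (right : Int) (c_car : Int), Dom_ver A L left right c_car → Pre_ver A L left right c_car → Spec_ver A L left right c_car (ver A L left right c_car)

-- ===== LEMMAS AND PROOFS =====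

-- folded maximum with a base element
def listMaxD (d : Int) (xs : List Int) : Int := xs.foldl max d

lemma listMaxD_le (d : Int) (xs : List Int) (b : Int) (hd : d ≤ b) (hx : ∀ x ∈ xs, x ≤ b) :
    listMaxD d xs ≤ b := by
  induction xs generalizing d with
  | nil => exact hd
  | cons y ys ih =>
      exact ih (max d y) (max_le hd (hx y (by simp))) (fun x hxm => hx x (by simp [hxm]))

lemma le_listMaxD (d : Int) (xs : List Int) : d ≤ listMaxD d xs :=
  (PySem.List.le_foldl_max xs d).1

lemma mem_le_listMaxD (d : Int) (xs : List Int) {x : Int} (hx : x ∈ xs) : x ≤ listMaxD d xs :=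
  (PySem.List.le_foldl_max xs d).2 x hx

lemma pyMaxOpt_le {a b : Option Int} {c : Int}
    (ha : ∀ x, a = some x → x ≤ c) (hb : ∀ y, b = some y → y ≤ c)
    (hne : a ≠ none ∨ b ≠ none) : pyMaxOpt a b ≤ c := by
  cases a with
  | none => cases b with
    | none => simp at hne
    | some y => exact hb y rfl
  | some x => cases b with
    | none => exact ha x rfl
    | some y => exact max_le (ha x rfl) (hb y rfl)

lemma le_pyMaxOpt_left {x : Int} (b : Option Int) : x ≤ pyMaxOpt (some x) b := by
  cases b <;> simp [pyMaxOpt]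

lemma le_pyMaxOpt_right {y : Int} (a : Option Int) : y ≤ pyMaxOpt a (some y) := by
  cases a <;> simp [pyMaxOpt]

-- membership in the conditional-add fold that ports a set comprehension
lemma mem_foldl_add_if {p : Int → Prop} [DecidablePred p] (f : Int → Int) (l : List Int)
    (s : PySem.Set Int) (y : Int) :
    y ∈ l.foldl (fun s x => if p x then PySem.Set.add s (f x) else s) s ↔
      y ∈ s ∨ ∃ x ∈ l, p x ∧ y = f x := by
  induction l generalizing s with
  | nil => simp
  | cons z zs ih =>
      simp only [List.foldl_cons, List.exists_mem_cons_iff]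
      by_cases hz : p z
      · rw [if_pos hz, ih]
        simp only [PySem.Set.mem_add]
        tauto
      · rw [if_neg hz, ih]
        tauto

-- A's result is at least the index it starts at
lemma ver_ge (A : List Int) (L : Int) :
    ∀ (k : Nat) (i l r : Int), PySem.Raise.InRange A.length i →
      ((A.length : Int) - i).toNat ≤ k → i ≤ ver A L l r i := by
  intro k
  induction k with
  | zero => intro i l r hir hk; rcases hir with ⟨h1, h2⟩; omega
  | succ k ih =>
      intro i l r hir hk
      obtain ⟨w, hw⟩ : ∃ w, PySem.List.pyGet? A i = some w := by
        cases hg : PySem.List.pyGet? A i with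
        | none => exact absurd ((PySem.List.pyGet?_eq_none_iff A i).1 hg) (by simpa using hir)
        | some w => exact ⟨w, rfl⟩
      rw [ver, dif_pos hir, hw]
      simp only [Option.getD_some]
      by_cases h1 : ¬ (l + w ≤ L) ∧ ¬ (r + w ≤ L)
      · simp [h1]
      · rw [if_neg h1]
        by_cases h2 : ((r + w ≤ L) ∨ (l + w ≤ L)) ∧ i = (A.length : Int) - 1
        · rw [if_pos h2]; omega
        · rw [if_neg h2]
          rcases hir with ⟨hlo, hhi⟩
          have hcl : (l + w ≤ L) ∨ (r + w ≤ L) := by tauto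
          have hne : i ≠ (A.length : Int) - 1 := by tauto
          have hir' : PySem.Raise.InRange A.length (i + 1) := ⟨by omega, by omega⟩
          by_cases hl : l + w ≤ L
          · have := ih (i + 1) (l + w) r hir' (by omega)
            simp only [if_pos hl]
            calc i ≤ i + 1 := by omega
              _ ≤ ver A L (l + w) r (i + 1) := this
              _ ≤ _ := le_pyMaxOpt_left _
          · have hr : r + w ≤ L := by tauto
            have := ih (i + 1) l (r + w) hir' (by omega)
            simp only [if_neg hl, if_pos hr]
            calc i ≤ i + 1 := by omega
              _ ≤ ver A L l (r + w) (i + 1) := this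
              _ ≤ _ := le_pyMaxOpt_right _

-- main invariant: the BFS level value equals the maximum of A's DFS values over the level's states
lemma go_spec (A : List Int) (L : Int) :
    ∀ (k : Nat) (i load : Int) (S : PySem.Set Int), PySem.Raise.InRange A.length i →
      ((A.length : Int) - i).toNat ≤ k →
      verAltGo A L i load S i =
        listMaxD i (S.map (fun l => ver A L l (load - l) i)) := by
  intro k
  induction k with
  | zero => intro i load S hir hk; rcases hir with ⟨h1, h2⟩; omega
  | succ k ih =>
      intro i load S hir hk
      have hlo := hir.1
      have hhi := hir.2
      obtain ⟨w, hw⟩ : ∃ w, PySem.List.pyGet? A i = some w := by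
        cases hg : PySem.List.pyGet? A i with
        | none => exact absurd ((PySem.List.pyGet?_eq_none_iff A i).1 hg) (by simpa using hir)
        | some w => exact ⟨w, rfl⟩
      have hw' : (PySem.List.pyGet? A i).getD 0 = w := by rw [hw]; rfl
      set w' : Int := (PySem.List.pyGet? A i).getD 0 with hwdef
      set nxt1 : PySem.Set Int :=
        S.foldl (fun s x => if x + w' ≤ L then PySem.Set.add s (x + w') else s) PySem.Set.empty with hn1
      set nxt : PySem.Set Int :=
        S.foldl (fun s x => if load + w' - x ≤ L then PySem.Set.add s x else s) nxt1 with hn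
      have hunfold : verAltGo A L i load S i =
          (if nxt = [] then i else verAltGo A L (i + 1) (load + w') nxt (i + 1)) := by
        rw [verAltGo, dif_pos hhi]
      have hw2 : w' = w := hw'
      rw [hunfold]
      rw [hw2] at hn1 hn ⊢
      have hmem1 : ∀ y, y ∈ nxt1 ↔ ∃ x ∈ S, x + w ≤ L ∧ y = x + w := by
        intro y
        rw [hn1, mem_foldl_add_if (fun x => x + w) S PySem.Set.empty y]
        simp [PySem.Set.empty]
      have hmem : ∀ y, y ∈ nxt ↔
          (∃ x ∈ S, x + w ≤ L ∧ y = x + w) ∨ (∃ x ∈ S, load + w - x ≤ L ∧ y = x) := by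
        intro y
        rw [hn, mem_foldl_add_if (fun x => x) S nxt1 y, hmem1]
      -- the value of A at a state of this level
      have hval : ∀ l, ver A L l (load - l) i =
          (if ¬ (l + w ≤ L) ∧ ¬ ((load - l) + w ≤ L) then i
           else if (((load - l) + w ≤ L) ∨ (l + w ≤ L)) ∧ i = (A.length : Int) - 1 then i + 1
           else pyMaxOpt
             (if l + w ≤ L then some (ver A L (l + w) (load - l) (i + 1)) else none)
             (if (load - l) + w ≤ L then some (ver A L l ((load - l) + w) (i + 1)) else none)) := by
        intro l
        rw [ver, dif_pos ⟨by omega, by omega⟩, hw]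
        simp only [Option.getD_some]
      by_cases hempty : nxt = []
      · rw [if_pos hempty]
        have hstuck : ∀ l ∈ S, ver A L l (load - l) i = i := by
          intro l hl
          have h1 : ¬ (l + w ≤ L) := fun hc =>
            (List.ne_nil_of_mem ((hmem (l + w)).2 (Or.inl ⟨l, hl, hc, rfl⟩))) hempty
          have h2 : ¬ ((load - l) + w ≤ L) := fun hc =>
            (List.ne_nil_of_mem ((hmem l).2 (Or.inr ⟨l, hl, by omega, rfl⟩))) hempty
          rw [hval l, if_pos ⟨h1, h2⟩]
        refine le_antisymm (le_listMaxD _ _) (listMaxD_le _ _ _ le_rfl ?_)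
        intro x hx
        obtain ⟨l, hl, rfl⟩ := List.mem_map.1 hx
        rw [hstuck l hl]
      · rw [if_neg hempty]
        obtain ⟨y0, hy0⟩ := List.exists_mem_of_ne_nil nxt hempty
        -- some state of this level can move
        obtain ⟨l0, hl0, hmove0⟩ : ∃ l ∈ S, (l + w ≤ L) ∨ ((load - l) + w ≤ L) := by
          rcases (hmem y0).1 hy0 with ⟨x, hx, hp, _⟩ | ⟨x, hx, hp, _⟩
          · exact ⟨x, hx, Or.inl hp⟩
          · exact ⟨x, hx, Or.inr (by omega)⟩
        by_cases hlast : i = (A.length : Int) - 1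
        · -- last car: the recursive call immediately falls out of the loop with best = i + 1
          rw [verAltGo]
          rw [dif_neg (by omega)]
          refine (le_antisymm ?_ ?_).symm
          · refine listMaxD_le _ _ _ (by omega) ?_
            intro x hx
            obtain ⟨l, hl, rfl⟩ := List.mem_map.1 hx
            rw [hval l]
            by_cases h1 : ¬ (l + w ≤ L) ∧ ¬ ((load - l) + w ≤ L)
            · rw [if_pos h1]; omega
            · rw [if_neg h1, if_pos ⟨by tauto, hlast⟩]
          · refine le_trans ?_ (mem_le_listMaxD i _
              (List.mem_map.2 ⟨l0, hl0, rfl⟩))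
            rw [hval l0, if_neg (by tauto), if_pos ⟨by tauto, hlast⟩]
        · -- middle car: apply the induction hypothesis one level down
          have hir' : PySem.Raise.InRange A.length (i + 1) := ⟨by omega, by omega⟩
          rw [ih (i + 1) (load + w) nxt hir' (by omega)]
          refine le_antisymm ?_ ?_
          · -- each child value is bounded by some parent's value
            refine listMaxD_le _ _ _ ?_ ?_
            · -- i + 1 ≤ max over S: the movable state l0 has value ≥ i + 1
              refine le_trans ?_ (mem_le_listMaxD i _ (List.mem_map.2 ⟨l0, hl0, rfl⟩))
              rw [hval l0, if_neg (by tauto), if_neg (by tauto)]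
              rcases hmove0 with hcl | hcr
              · rw [if_pos hcl]
                exact le_trans (ver_ge A L k (i + 1) (l0 + w) (load - l0) hir' (by omega))
                  (le_pyMaxOpt_left _)
              · rw [if_pos hcr]
                exact le_trans (ver_ge A L k (i + 1) l0 ((load - l0) + w) hir' (by omega))
                  (le_pyMaxOpt_right _)
            · intro x hx
              obtain ⟨l', hl', rfl⟩ := List.mem_map.1 hx
              rcases (hmem l').1 hl' with ⟨l, hl, hcl, hEq⟩ | ⟨l, hl, hcr, hEq⟩
              · -- l' = l + w came from a left move of l
                refine le_trans ?_ (mem_le_listMaxD i _ (List.mem_map.2 ⟨l, hl, rfl⟩))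
                have h3 : load + w - (l + w) = load - l := by ring
                rw [hEq, h3, hval l, if_neg (by tauto), if_neg (by tauto), if_pos hcl]
                exact le_pyMaxOpt_left _
              · -- l' = l came from a right move of l
                have hcr' : (load - l) + w ≤ L := by omega
                refine le_trans ?_ (mem_le_listMaxD i _ (List.mem_map.2 ⟨l, hl, rfl⟩))
                have h3 : load + w - l = (load - l) + w := by ring
                rw [hEq, h3, hval l, if_neg (by tauto), if_neg (by tauto), if_pos hcr']
                exact le_pyMaxOpt_right _
          · -- each parent's value is bounded by the max over the children
            refine listMaxD_le _ _ _ ?_ ?_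
            · calc i ≤ i + 1 := by omega
                _ ≤ _ := le_listMaxD _ _
            · intro x hx
              obtain ⟨l, hl, rfl⟩ := List.mem_map.1 hx
              rw [hval l]
              by_cases h1 : ¬ (l + w ≤ L) ∧ ¬ ((load - l) + w ≤ L)
              · rw [if_pos h1]
                calc i ≤ i + 1 := by omega
                  _ ≤ _ := le_listMaxD _ _
              · rw [if_neg h1, if_neg (by tauto)]
                refine pyMaxOpt_le ?_ ?_ ?_
                · intro v hv
                  by_cases hcl : l + w ≤ L
                  · rw [if_pos hcl] at hv
                    cases hv
                    have hmem' : l + w ∈ nxt := (hmem (l + w)).2 (Or.inl ⟨l, hl, hcl, rfl⟩)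
                    refine le_trans (le_of_eq ?_) (mem_le_listMaxD (i + 1) _
                      (List.mem_map.2 ⟨l + w, hmem', rfl⟩))
                    have h3 : (load + w) - (l + w) = load - l := by ring
                    rw [h3]
                  · rw [if_neg hcl] at hv; cases hv
                · intro v hv
                  by_cases hcr : (load - l) + w ≤ L
                  · rw [if_pos hcr] at hv
                    cases hv
                    have hmem' : l ∈ nxt := (hmem l).2 (Or.inr ⟨l, hl, by omega, rfl⟩)
                    refine le_trans (le_of_eq ?_) (mem_le_listMaxD (i + 1) _
                      (List.mem_map.2 ⟨l, hmem', rfl⟩))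
                    have h3 : (load + w) - l = (load - l) + w := by ring
                    rw [h3]
                  · rw [if_neg hcr] at hv; cases hv
                · by_cases hcl : l + w ≤ L
                  · left; simp [hcl]
                  · right
                    have hcr : (load - l) + w ≤ L := by tauto
                    simp [hcr]

-- ===== VERDICT (by name: the statement is the Claim_ definition above) =====
theorem ver_spec : Claim_equal_ver := by
  intro A L left right c_car _hDom hPre
  unfold Spec_ver ver_alt
  have hof : PySem.Set.ofList [left] = [left] := rfl
  rw [hof, go_spec A L ((A.length : Int) - c_car).toNat c_car (left + right) [left] hPre le_rfl]
  have : left + right - left = right := by ring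
  simp only [List.map, this, listMaxD, List.foldl]
  have hge : c_car ≤ ver A L left right c_car :=
    ver_ge A L ((A.length : Int) - c_car).toNat c_car left right hPre le_rfl
  omega
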